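-- pv_equiv track=rewrite | github.com/sarath805/codemind-python | CLOTHING_STORE.py | noop
-- ===== SOURCE A (Python) =====
-- def noop(a,l):
--     b = l
--     s = set(l)
--     p = 0
--     for i in s:
--         o = l.count(i)
--         k = o//2
--         p = p+k
--     return p
-- ===== SOURCE B (Python) =====
-- def noop(a, l):
--     # One pass: toggle elements in a 'pending' set of odd-count-so-far values;
--     # each time an element reappears while pending, one pair is completed.
--     pending = set()
--     p = 0
--     for x in l:
--         if x in pending:
--             pending.discard(x)
--             p += 1
--         else:
--             pending.add(x)
--     return p
-- ===== Notes on version B (the rewrite author's own statement) =====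
-- stated objective: faster
-- what changed: Instead of building set(l) and re-scanning l with l.count(i) for every distinct element, B makes a single pass over l toggling a 'pending' set of odd-count-so-far elements and counts each completed pair incrementally.
import Mathlib
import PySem

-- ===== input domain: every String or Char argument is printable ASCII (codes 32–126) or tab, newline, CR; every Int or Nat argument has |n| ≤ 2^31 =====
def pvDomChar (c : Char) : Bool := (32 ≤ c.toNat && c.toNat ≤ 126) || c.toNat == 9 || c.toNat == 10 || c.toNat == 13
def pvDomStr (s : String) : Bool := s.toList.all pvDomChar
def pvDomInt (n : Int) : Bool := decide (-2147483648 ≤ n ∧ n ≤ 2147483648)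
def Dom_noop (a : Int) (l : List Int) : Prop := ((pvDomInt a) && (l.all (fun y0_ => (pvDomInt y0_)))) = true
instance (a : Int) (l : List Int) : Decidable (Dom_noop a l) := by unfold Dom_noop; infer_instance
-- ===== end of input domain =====

-- B replaces A's set-plus-repeated-l.count scans by a single pass toggling a set of
-- odd-count-so-far elements (objective: faster, one pass instead of a scan per distinct element).


-- ===== PORT A =====
-- b = l is dropped (unused); the for-loop over set(l) is a foldl over PySem.Set.ofList l
-- (sum of order-independent terms, so set iteration order cannot matter).
def noop (a : Int) (l : List Int) : Int :=
  (PySem.Set.ofList l).foldl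
    (fun p i =>
      let o : Int := (PySem.List.count l i : Int)
      let k : Int := PySem.Int.floordiv o 2
      p + k) 0

-- ===== PORT B =====
def noop_alt (a : Int) (l : List Int) : Int :=
  (l.foldl
    (fun (st : PySem.Set Int × Int) x =>
      if PySem.Set.contains st.1 x then (PySem.Set.discard st.1 x, st.2 + 1)
      else (PySem.Set.add st.1 x, st.2))
    (PySem.Set.empty, 0)).2

-- ===== PRECONDITION & SPEC =====
def Spec_noop (a : Int) (l : List Int) (out : Int) : Prop := out = noop_alt a l
instance (a : Int) (l : List Int) (out : Int) : Decidable (Spec_noop a l out) := by unfold Spec_noop; infer_instance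

-- ===== CLAIM (what is proved, stated in full; the proofs are below) =====
def Claim_equal_noop : Prop := ∀ (a : Int) (l : List Int), Dom_noop a l → Spec_noop a l (noop a l)

-- ===== LEMMAS AND PROOFS =====

-- Mathematical value both programs compute: sum over distinct elements of count/2.
def pairSum (l : List Int) : Int := ∑ x ∈ l.toFinset, ((List.count x l) / 2 : Nat)

theorem pairSum_append (l : List Int) (x : Int) :
    pairSum (l ++ [x]) = pairSum l + (if List.count x l % 2 = 1 then 1 else 0) := by
  classical
  unfold pairSum
  have hT : (l ++ [x]).toFinset = insert x l.toFinset := by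
    simp [List.toFinset_append, Finset.union_comm]
  rw [hT]
  have hmem : x ∈ insert x l.toFinset := Finset.mem_insert_self _ _
  rw [← Finset.sum_erase_add _ _ hmem, Finset.erase_insert_eq_erase]
  have hcong : ∀ y ∈ l.toFinset.erase x,
      ((List.count y (l ++ [x]) / 2 : Nat) : Int) = ((List.count y l / 2 : Nat) : Int) := by
    intro y hy
    have hyx : y ≠ x := Finset.ne_of_mem_erase hy
    have hxy : x ≠ y := Ne.symm hyx
    simp [List.count_append, List.count_singleton, hxy]
  rw [Finset.sum_congr rfl hcong]
  have hbase : ∑ y ∈ l.toFinset, ((List.count y l / 2 : Nat) : Int)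
      = (∑ y ∈ l.toFinset.erase x, ((List.count y l / 2 : Nat) : Int)) + ((List.count x l / 2 : Nat) : Int) := by
    by_cases hx : x ∈ l.toFinset
    · rw [Finset.sum_erase_add _ _ hx]
    · rw [Finset.erase_eq_self.mpr hx]
      have : List.count x l = 0 := by
        simpa using (List.count_eq_zero.mpr (by simpa using hx))
      simp [this]
  rw [hbase]
  have hx' : List.count x (l ++ [x]) = List.count x l + 1 := by
    simp [List.count_append]
  rw [hx']
  have : (((List.count x l + 1) / 2 : Nat) : Int)
      = ((List.count x l / 2 : Nat) : Int) + (if List.count x l % 2 = 1 then 1 else 0) := by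
    split_ifs with h <;> push_cast <;> omega
  rw [this]; ring

theorem B_inv (l : List Int) :
    (∀ y, y ∈ (l.foldl
      (fun (st : PySem.Set Int × Int) x =>
        if PySem.Set.contains st.1 x then (PySem.Set.discard st.1 x, st.2 + 1)
        else (PySem.Set.add st.1 x, st.2))
      (PySem.Set.empty, 0)).1 ↔ List.count y l % 2 = 1) ∧
    (l.foldl
      (fun (st : PySem.Set Int × Int) x =>
        if PySem.Set.contains st.1 x then (PySem.Set.discard st.1 x, st.2 + 1)
        else (PySem.Set.add st.1 x, st.2))
      (PySem.Set.empty, 0)).2 = pairSum l := by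
  induction l using List.reverseRecOn with
  | nil => simp [PySem.Set.empty, pairSum]
  | append_singleton l' x ih =>
    obtain ⟨ihmem, ihp⟩ := ih
    rw [List.foldl_append] at *
    set st := (l'.foldl
      (fun (st : PySem.Set Int × Int) x =>
        if PySem.Set.contains st.1 x then (PySem.Set.discard st.1 x, st.2 + 1)
        else (PySem.Set.add st.1 x, st.2))
      (PySem.Set.empty, 0)) with hst
    by_cases hx : x ∈ st.1
    · have hc : PySem.Set.contains st.1 x = true := by
        simp [PySem.Set.contains, hx]
      have hodd : List.count x l' % 2 = 1 := (ihmem x).mp hx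
      constructor
      · intro y
        simp only [List.foldl_cons, List.foldl_nil, hc, if_pos]
        by_cases hyx : y = x
        · subst hyx
          simp [PySem.Set.discard, List.count_append]
          omega
        · simp [PySem.Set.discard, List.mem_filter, hyx, List.count_append,
            List.count_singleton, Ne.symm hyx, ihmem y]
      · simp only [List.foldl_cons, List.foldl_nil, hc, if_pos]
        rw [pairSum_append, if_pos hodd]
        simp [ihp]
    · have hc : PySem.Set.contains st.1 x = false := by
        simp [PySem.Set.contains, hx]
      have heven : ¬ (List.count x l' % 2 = 1) := fun h => hx ((ihmem x).mpr h)
      constructor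
      · intro y
        simp only [List.foldl_cons, List.foldl_nil, hc, if_neg, Bool.false_eq_true,
          not_false_iff, ite_false]
        by_cases hyx : y = x
        · subst hyx
          have hcnt : List.count y (l' ++ [y]) = List.count y l' + 1 := by
            simp [List.count_append]
          rw [hcnt]
          simp only [PySem.Set.add, hc, Bool.false_eq_true, if_false, List.mem_append,
            List.mem_singleton]
          constructor
          · intro _; omega
          · intro _; exact Or.inr trivial
        · simp [PySem.Set.add, hc, hx, List.mem_append, hyx, List.count_append,
            List.count_singleton, Ne.symm hyx, ihmem y]
      · simp only [List.foldl_cons, List.foldl_nil, hc, Bool.false_eq_true,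
          not_false_iff, ite_false]
        rw [pairSum_append, if_neg heven]
        simp [ihp]

theorem noopA_eq_pairSum (a : Int) (l : List Int) : noop a l = pairSum l := by
  classical
  unfold noop
  have hg : (fun (p i : Int) =>
      let o : Int := (PySem.List.count l i : Int)
      let k : Int := PySem.Int.floordiv o 2
      p + k) = fun (p i : Int) => p + ((List.count i l / 2 : Nat) : Int) := by
    funext p i
    simp only [PySem.List.count_eq]
    exact congrArg (p + ·) (by exact_mod_cast PySem.Int.floordiv_natCast (List.count i l) 2)
  rw [hg, PySem.List.foldl_add, zero_add,
    ← List.sum_toFinset _ (PySem.Set.nodup_ofList l)]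
  have hT : (PySem.Set.ofList l).toFinset = l.toFinset := by
    ext y; simp [List.mem_toFinset, PySem.Set.mem_ofList]
  rw [hT]; rfl

theorem noopB_eq_pairSum (a : Int) (l : List Int) : noop_alt a l = pairSum l := by
  unfold noop_alt
  exact (B_inv l).2

-- ===== VERDICT (by name: the statement is the Claim_ definition above) =====
theorem noop_spec : Claim_equal_noop := by
  intro a l _
  unfold Spec_noop
  rw [noopA_eq_pairSum, noopB_eq_pairSum]
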